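-- pv_equiv track=rewrite | github.com/pypi-data/pypi-mirror-99 | packages/shirkhan/shirkhan-0.0.13-py3-none-any.whl/shirkhan/shir_syllable.py | __token_to_group
-- ===== SOURCE A (Python) =====
-- def __token_to_group(token):
--     """
--     吧给定的token 按照元音分组
--     :param token:
--     :return:
--     """
--     group = []
--     tmp = []
--     for index in range(len(token)):
--         item = token[index]
--         tmp.append(item)
--
--         if item == '1':
--             group.append(tmp)
--             tmp = []
--         elif index == len(token) - 1:
--             group.append(tmp)
--     return group
-- ===== SOURCE B (Python) =====
-- def __token_to_group(token):
--     starts = [0] + [i + 1 for i, x in enumerate(token) if x == '1']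
--     ends = starts[1:] + [len(token)]
--     return [token[a:b] for a, b in zip(starts, ends) if a < b]
-- ===== Notes on version B (the rewrite author's own statement) =====
-- stated objective: simpler
-- what changed: Replaces the stateful accumulator loop (tmp buffer, delimiter flush, last-index special case) with computing all cut positions after each '1' once and materialising the groups as slices between consecutive cut points.
import Mathlib
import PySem

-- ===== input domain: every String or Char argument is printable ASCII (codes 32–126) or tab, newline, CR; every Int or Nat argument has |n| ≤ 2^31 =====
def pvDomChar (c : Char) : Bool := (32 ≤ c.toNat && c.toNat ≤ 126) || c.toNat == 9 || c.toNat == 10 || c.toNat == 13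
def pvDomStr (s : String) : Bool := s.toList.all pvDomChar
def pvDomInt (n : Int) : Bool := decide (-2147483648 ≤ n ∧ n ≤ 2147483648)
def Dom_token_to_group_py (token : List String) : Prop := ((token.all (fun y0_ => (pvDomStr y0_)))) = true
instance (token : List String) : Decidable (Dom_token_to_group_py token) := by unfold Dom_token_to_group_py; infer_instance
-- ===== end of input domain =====

-- B replaces A's stateful buffer/flush loop by computing the cut positions after each '1'
-- once and slicing the token between consecutive cut points (simpler decomposition, same cost).


-- ===== PORT A =====
-- literal port of A: for index in range(len(token)) with state (group, tmp)
def token_to_group_py (token : List String) : List (List String) :=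
  let n : Int := token.length
  let st := (PySem.List.pyRange 0 n 1).foldl
    (fun (st : List (List String) × List String) index =>
      let item := PySem.List.pyGetD token index ""
      let tmp := st.2 ++ [item]
      if item = "1" then (st.1 ++ [tmp], [])
      else if index = n - 1 then (st.1 ++ [tmp], tmp)
      else (st.1, tmp)) ([], [])
  st.1

-- ===== PORT B =====
-- literal port of Source B: cut positions after each '1', then slices between consecutive cuts
def token_to_group_py_alt (token : List String) : List (List String) :=
  let starts : List Int :=
    0 :: (PySem.List.enumerate token 0).filterMap
      (fun p => if p.2 = "1" then some (p.1 + 1) else none)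
  let ends : List Int := starts.tail ++ [(token.length : Int)]
  (starts.zip ends).filterMap
    (fun p => if p.1 < p.2 then some (PySem.List.slice token (some p.1) (some p.2)) else none)

-- ===== PRECONDITION & SPEC =====
def Spec_token_to_group_py (token : List String) (out : List (List String)) : Prop := out = token_to_group_py_alt token
instance (token : List String) (out : List (List String)) : Decidable (Spec_token_to_group_py token out) := by unfold Spec_token_to_group_py; infer_instance

-- ===== CLAIM (what is proved, stated in full; the proofs are below) =====
def Claim_equal_token_to_group_py : Prop := ∀ (token : List String), Dom_token_to_group_py token → Spec_token_to_group_py token (token_to_group_py token)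

-- ===== LEMMAS AND PROOFS =====

-- reference segmentation: split after every "1", keeping it; trailing run kept, empty input ↦ []
def splitAfter : List String → List (List String)
  | [] => []
  | x :: xs =>
    if x = "1" then [x] :: splitAfter xs
    else match splitAfter xs with
      | [] => [[x]]
      | g :: gs => (x :: g) :: gs

def mapHead (f : List String → List String) : List (List String) → List (List String)
  | [] => []
  | g :: gs => f g :: gs

def finalTmp (tmp : List String) : List String → List String
  | [] => tmp
  | x :: xs => if x = "1" then finalTmp [] xs else finalTmp (tmp ++ [x]) xs

lemma splitAfter_ne_nil (xs : List String) (h : xs ≠ []) : splitAfter xs ≠ [] := by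
  cases xs with
  | nil => exact absurd rfl h
  | cons x xs =>
    simp only [splitAfter]
    split_ifs
    · simp
    · cases splitAfter xs <;> simp

-- A's loop, generalized over the accumulator and the enumeration start
lemma loopA (n : Int) (xs : List String) : ∀ (s : Int) (group : List (List String)) (tmp : List String),
    s + xs.length = n →
    (PySem.List.enumerate xs s).foldl
      (fun (st : List (List String) × List String) p =>
        if p.2 = "1" then (st.1 ++ [st.2 ++ [p.2]], [])
        else if p.1 = n - 1 then (st.1 ++ [st.2 ++ [p.2]], st.2 ++ [p.2])
        else (st.1, st.2 ++ [p.2])) (group, tmp)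
    = (group ++ mapHead (fun g => tmp ++ g) (splitAfter xs), finalTmp tmp xs) := by
  induction xs with
  | nil => intro s group tmp _; simp [PySem.List.enumerate_nil, splitAfter, mapHead, finalTmp]
  | cons x xs ih =>
    intro s group tmp h
    rw [PySem.List.enumerate_cons, List.foldl_cons]
    by_cases hx : x = "1"
    · have hstep : (if ((s, x) : Int × String).2 = "1" then (((group, tmp) : List (List String) × List String).1 ++ [((group, tmp) : List (List String) × List String).2 ++ [((s, x) : Int × String).2]], ([] : List String))
          else if ((s, x) : Int × String).1 = n - 1 then (((group, tmp) : List (List String) × List String).1 ++ [((group, tmp) : List (List String) × List String).2 ++ [((s, x) : Int × String).2]], ((group, tmp) : List (List String) × List String).2 ++ [((s, x) : Int × String).2])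
          else (((group, tmp) : List (List String) × List String).1, ((group, tmp) : List (List String) × List String).2 ++ [((s, x) : Int × String).2])) = ((group ++ [tmp ++ [x]], []) : List (List String) × List String) := by
        simp [hx]
      rw [hstep, ih (s + 1) (group ++ [tmp ++ [x]]) [] (by simp at h ⊢; omega)]
      simp [hx, splitAfter, mapHead, finalTmp]
      cases splitAfter xs <;> rfl
    · cases xs with
      | nil =>
        have hs : s = n - 1 := by simp at h; omega
        simp [hx, hs, PySem.List.enumerate_nil, splitAfter, mapHead, finalTmp]
      | cons y ys =>
        have hs : s ≠ n - 1 := by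
          simp only [List.length_cons] at h; push_cast at h; omega
        have hstep : (if ((s, x) : Int × String).2 = "1" then (((group, tmp) : List (List String) × List String).1 ++ [((group, tmp) : List (List String) × List String).2 ++ [((s, x) : Int × String).2]], ([] : List String))
            else if ((s, x) : Int × String).1 = n - 1 then (((group, tmp) : List (List String) × List String).1 ++ [((group, tmp) : List (List String) × List String).2 ++ [((s, x) : Int × String).2]], ((group, tmp) : List (List String) × List String).2 ++ [((s, x) : Int × String).2])
            else (((group, tmp) : List (List String) × List String).1, ((group, tmp) : List (List String) × List String).2 ++ [((s, x) : Int × String).2])) = ((group, tmp ++ [x]) : List (List String) × List String) := by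
          simp [hx, hs]
        rw [hstep, ih (s + 1) group (tmp ++ [x]) (by simp at h ⊢; omega)]
        have hne := splitAfter_ne_nil (y :: ys) (by simp)
        cases hsp : splitAfter (y :: ys) with
        | nil => exact absurd hsp hne
        | cons g gs =>
          have h1 : splitAfter (x :: y :: ys) = (x :: g) :: gs := by
            rw [show splitAfter (x :: y :: ys) = if x = "1" then [x] :: splitAfter (y :: ys)
                else match splitAfter (y :: ys) with | [] => [[x]] | g :: gs => (x :: g) :: gs from rfl,
              if_neg hx, hsp]
          have h2 : finalTmp tmp (x :: y :: ys) = finalTmp (tmp ++ [x]) (y :: ys) := by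
            rw [show finalTmp tmp (x :: y :: ys) = if x = "1" then finalTmp [] (y :: ys)
                else finalTmp (tmp ++ [x]) (y :: ys) from rfl, if_neg hx]
          rw [h1, h2]
          simp [mapHead]

-- A equals splitAfter
lemma A_eq_splitAfter (token : List String) : token_to_group_py token = splitAfter token := by
  show ((PySem.List.pyRange 0 (token.length : Int) 1).foldl
      (fun (st : List (List String) × List String) index =>
        if PySem.List.pyGetD token index "" = "1" then (st.1 ++ [st.2 ++ [PySem.List.pyGetD token index ""]], [])
        else if index = (token.length : Int) - 1 then (st.1 ++ [st.2 ++ [PySem.List.pyGetD token index ""]], st.2 ++ [PySem.List.pyGetD token index ""])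
        else (st.1, st.2 ++ [PySem.List.pyGetD token index ""])) ([], [])).1 = splitAfter token
  have hmap := List.foldl_map
    (f := fun j : Int => (j, PySem.List.pyGetD token j ""))
    (g := fun (st : List (List String) × List String) (p : Int × String) =>
      if p.2 = "1" then (st.1 ++ [st.2 ++ [p.2]], ([] : List String))
      else if p.1 = ((token.length : Int)) - 1 then (st.1 ++ [st.2 ++ [p.2]], st.2 ++ [p.2])
      else (st.1, st.2 ++ [p.2]))
    (l := PySem.List.pyRange 0 (token.length : Int) 1)
    (init := (([] : List (List String)), ([] : List String)))
  have h := loopA (token.length : Int) token 0 [] [] (by simp)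
  rw [PySem.List.enumerate_eq_map_pyRange (d := "")] at h
  have hlen : PySem.List.len token = (token.length : Int) := rfl
  rw [hlen] at h
  rw [hmap] at h
  rw [h]
  cases splitAfter token <;> rfl

-- B side: cut positions after each '1' in xs, enumerated from s
def cuts (xs : List String) (s : Int) : List Int :=
  (PySem.List.enumerate xs s).filterMap (fun p => if p.2 = "1" then some (p.1 + 1) else none)

lemma cuts_cons (x : String) (xs : List String) (s : Int) :
    cuts (x :: xs) s = if x = "1" then (s + 1) :: cuts xs (s + 1) else cuts xs (s + 1) := by
  simp only [cuts, PySem.List.enumerate_cons, List.filterMap_cons]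
  split_ifs <;> simp

lemma cuts_lb (xs : List String) : ∀ (s c : Int), c ∈ cuts xs s → s + 1 ≤ c := by
  induction xs with
  | nil => intro s c hc; simp [cuts, PySem.List.enumerate_nil] at hc
  | cons x xs ih =>
    intro s c hc
    rw [cuts_cons] at hc
    split_ifs at hc with hx
    · rcases List.mem_cons.mp hc with h | h
      · omega
      · have := ih (s + 1) c h; omega
    · have := ih (s + 1) c hc; omega

-- slice step: peeling one element off the front of a slice
lemma slice_step (t : List String) (x : String) (r : List String) (a b : Int)
    (ha : 0 ≤ a) (hd : t.drop a.toNat = x :: r) (hb : a + 1 ≤ b) :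
    PySem.List.slice t (some a) (some b) = x :: PySem.List.slice t (some (a + 1)) (some b) := by
  rw [PySem.List.slice_toNat t (a := a) (b := b) ha (by omega),
    PySem.List.slice_toNat t (a := a + 1) (b := b) (by omega) (by omega)]
  have h1 : (a + 1).toNat = a.toNat + 1 := by omega
  have h2 : t.drop (a.toNat + 1) = r := by
    have h := congrArg (List.drop 1) hd
    simp only [List.drop_drop] at h
    simpa [Nat.add_comm] using h
  rw [hd, h1, h2]
  have h3 : b.toNat - a.toNat = (b.toNat - (a.toNat + 1)) + 1 := by omega
  rw [h3, List.take_succ_cons]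

-- drop one more element after peeling the head
lemma drop_succ_of_drop_cons (t : List String) (x : String) (r : List String) (s : Int)
    (hs : 0 ≤ s) (hd : t.drop s.toNat = x :: r) : t.drop (s + 1).toNat = r := by
  have h := congrArg (List.drop 1) hd
  simp only [List.drop_drop] at h
  rw [show (s + 1).toNat = s.toNat + 1 from by omega]
  simpa [Nat.add_comm] using h

-- B's zip/filterMap, generalized over the base offset s into the fixed token t
lemma loopB (t : List String) (xs : List String) : ∀ (s : Int), 0 ≤ s → t.drop s.toNat = xs →
    ((s :: cuts xs s).zip (cuts xs s ++ [s + xs.length])).filterMap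
      (fun p => if p.1 < p.2 then some (PySem.List.slice t (some p.1) (some p.2)) else none)
    = splitAfter xs := by
  induction xs with
  | nil => intro s hs hd; simp [cuts, PySem.List.enumerate_nil, splitAfter]
  | cons x xs ih =>
    intro s hs hd
    rw [cuts_cons]
    have hE : s + ((x :: xs).length : Int) = (s + 1) + (xs.length : Int) := by
      simp only [List.length_cons]; push_cast; omega
    by_cases hx : x = "1"
    · simp only [if_pos hx, List.cons_append]
      rw [hE, List.zip_cons_cons, List.filterMap_cons]
      have h1 : PySem.List.slice t (some s) (some (s + 1)) = [x] := by
        rw [slice_step t x xs s (s + 1) hs hd (by omega)]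
        rw [PySem.List.slice_toNat t (a := s + 1) (b := s + 1) (by omega) (by omega)]
        simp
      have h2 := ih (s + 1) (by omega) (drop_succ_of_drop_cons t x xs s hs hd)
      simp only [if_pos (by omega : s < s + 1), h1]
      rw [h2, hx]
      simp [splitAfter]
    · simp only [if_neg hx]
      cases hxs : xs with
      | nil =>
        simp only [cuts, PySem.List.enumerate_nil, List.filterMap_nil]
        have h1 : PySem.List.slice t (some s) (some (s + 1)) = [x] := by
          rw [slice_step t x [] s (s + 1) hs (by rw [hd, hxs]) (by omega)]
          rw [PySem.List.slice_toNat t (a := s + 1) (b := s + 1) (by omega) (by omega)]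
          simp
        simp [splitAfter, hx, h1, (by omega : s < s + 1)]
      | cons y ys =>
        rw [← hxs, hE]
        obtain ⟨b0, rest', hb⟩ : ∃ b0 rest',
            cuts xs (s + 1) ++ [(s + 1) + (xs.length : Int)] = b0 :: rest' := by
          cases h : cuts xs (s + 1) with
          | nil => exact ⟨(s + 1) + (xs.length : Int), [], by simp⟩
          | cons c cs => exact ⟨c, cs ++ [(s + 1) + (xs.length : Int)], by simp⟩
        have hb0 : s + 1 < b0 := by
          cases h : cuts xs (s + 1) with
          | nil =>
            rw [h] at hb
            simp at hb
            have : xs.length ≠ 0 := by rw [hxs]; simp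
            omega
          | cons c cs =>
            rw [h] at hb
            have hc : c ∈ cuts xs (s + 1) := by rw [h]; exact List.mem_cons_self
            have := cuts_lb xs (s + 1) c hc
            simp at hb
            omega
        have hdr := drop_succ_of_drop_cons t x xs s hs hd
        have hih := ih (s + 1) (by omega) hdr
        rw [hb] at hih ⊢
        rw [List.zip_cons_cons, List.filterMap_cons] at hih ⊢
        simp only [if_pos (by omega : (s : Int) < b0), if_pos (by omega : (s + 1 : Int) < b0)] at hih ⊢
        rw [slice_step t x xs s b0 hs hd (by omega)]
        have hne := splitAfter_ne_nil xs (by rw [hxs]; simp)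
        cases hsp : splitAfter xs with
        | nil => exact absurd hsp hne
        | cons g gs =>
          rw [hsp] at hih
          have hA : PySem.List.slice t (some (s + 1)) (some b0) = g := by
            injection hih
          have h2 : List.filterMap
              (fun p => if p.1 < p.2 then some (PySem.List.slice t (some p.1) (some p.2)) else none)
              ((cuts xs (s + 1)).zip rest') = gs := by
            injection hih
          rw [hA, h2]
          have h1 : splitAfter (x :: xs) = (x :: g) :: gs := by
            rw [show splitAfter (x :: xs) = if x = "1" then [x] :: splitAfter xs
                else match splitAfter xs with | [] => [[x]] | g :: gs => (x :: g) :: gs from rfl,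
              if_neg hx, hsp]
          rw [h1]

-- B equals splitAfter
lemma B_eq_splitAfter (token : List String) : token_to_group_py_alt token = splitAfter token := by
  unfold token_to_group_py_alt
  have := loopB token token 0 le_rfl (by simp)
  simp only [cuts] at this
  simpa using this

-- ===== VERDICT (by name: the statement is the Claim_ definition above) =====
theorem token_to_group_py_spec : Claim_equal_token_to_group_py := by
  intro token _
  unfold Spec_token_to_group_py
  rw [A_eq_splitAfter, B_eq_splitAfter]
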